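-- pv_equiv track=rewrite | github.com/kanguyen-vn/schenky | src/model/score.py | add_indentation
-- ===== SOURCE A (Python) =====
-- def add_indentation(old_lines):
--     lines = [line for possible_lines in old_lines
--              for line in possible_lines.split("\n")]
--     indent = 0
--     INDENT_SPACES = 4
--     for i in range(len(lines)):
--         if "}" in lines[i] or ">>" in lines[i]:
--             indent -= 1
--         lines[i] = " " * (INDENT_SPACES * indent) + lines[i]
--         if "{" in lines[i] or "<<" in lines[i]:
--             indent += 1
--     return lines
-- ===== SOURCE B (Python) =====
-- def add_indentation(old_lines):
--     lines = [l for s in old_lines for l in s.split("\n")]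
--
--     def opens(l):
--         return 1 if "{" in l or "<<" in l else 0
--
--     def closes(l):
--         return 1 if "}" in l or ">>" in l else 0
--
--     # stateless: each line's indent level is a closed form over the prefix of lines
--     return [" " * (4 * (sum(map(opens, lines[:i])) - sum(map(closes, lines[:i + 1])))) + l
--             for i, l in enumerate(lines)]
-- ===== Notes on version B (the rewrite author's own statement) =====
-- stated objective: alternative
-- what changed: A's single stateful loop mutating lines in place with a running indent counter is replaced by a stateless per-line closed form: line i's level is counted from scratch as (opens in lines[:i]) - (closes in lines[:i+1]) via nested prefix scans, then rendered in a comprehension.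
import Mathlib
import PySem

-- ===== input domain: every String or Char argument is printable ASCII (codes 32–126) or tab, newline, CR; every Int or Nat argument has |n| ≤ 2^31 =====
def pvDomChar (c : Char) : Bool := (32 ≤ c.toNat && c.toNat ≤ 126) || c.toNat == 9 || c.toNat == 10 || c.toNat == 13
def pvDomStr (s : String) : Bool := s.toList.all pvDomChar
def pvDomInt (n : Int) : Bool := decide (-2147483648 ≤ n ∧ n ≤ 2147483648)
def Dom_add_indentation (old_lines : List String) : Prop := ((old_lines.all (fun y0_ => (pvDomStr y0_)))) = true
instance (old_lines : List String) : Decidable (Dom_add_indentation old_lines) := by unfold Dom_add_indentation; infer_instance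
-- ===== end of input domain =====

-- B replaces A's stateful in-place loop with a stateless per-line closed form
-- (level of line i = opens in lines[:i] minus closes in lines[:i+1], recounted by
-- nested prefix scans); objective: alternative (B is quadratic in the line count).

-- ===== PORT A =====
-- A: flatten via split("\n"), then one loop over indices: decrement indent on "}"/">>",
-- prepend spaces in place, increment if the (already prefixed) line contains "{" or "<<".
def add_indentation (old_lines : List String) : List String :=
  let lines := old_lines.flatMap (fun s => (PySem.Str.split? s "\n").getD [])
  (lines.foldl (fun (st : List String × Int) l =>
      let indent1 := if PySem.Str.isIn "}" l || PySem.Str.isIn ">>" l then st.2 - 1 else st.2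
      -- " " * (4 * indent) + lines[i]  (a negative repeat count gives the empty string)
      let newl := String.ofList (PySem.List.pyRepeat [' '] (4 * indent1) ++ l.toList)
      let indent2 := if PySem.Str.isIn "{" newl || PySem.Str.isIn "<<" newl then indent1 + 1 else indent1
      (st.1 ++ [newl], indent2)) ([], 0)).1

-- ===== PORT B =====
-- B's helpers opens/closes from Source B
def pvOpens (l : String) : Int := if PySem.Str.isIn "{" l || PySem.Str.isIn "<<" l then 1 else 0
def pvCloses (l : String) : Int := if PySem.Str.isIn "}" l || PySem.Str.isIn ">>" l then 1 else 0

-- B: flatten, then for each (i, l) in enumerate(lines) compute the level from scratch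
-- as sum(opens over lines[:i]) - sum(closes over lines[:i+1]) and render it.
def add_indentation_alt (old_lines : List String) : List String :=
  let lines := old_lines.flatMap (fun s => (PySem.Str.split? s "\n").getD [])
  (PySem.List.enumerate lines 0).map (fun p =>
    String.ofList (PySem.List.pyRepeat [' ']
      (4 * (((PySem.List.slice lines none (some p.1)).map pvOpens).sum
            - ((PySem.List.slice lines none (some (p.1 + 1))).map pvCloses).sum)) ++ p.2.toList))

-- ===== PRECONDITION & SPEC =====
def Spec_add_indentation (old_lines : List String) (out : List String) : Prop := out = add_indentation_alt old_lines
instance (old_lines : List String) (out : List String) : Decidable (Spec_add_indentation old_lines out) := by unfold Spec_add_indentation; infer_instance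

-- ===== CLAIM (what is proved, stated in full; the proofs are below) =====
def Claim_equal_add_indentation : Prop := ∀ (old_lines : List String), Dom_add_indentation old_lines → Spec_add_indentation old_lines (add_indentation old_lines)

-- ===== LEMMAS AND PROOFS =====

def pvRender (ind : Int) (l : String) : String :=
  String.ofList (PySem.List.pyRepeat [' '] (4 * ind) ++ l.toList)

-- common reference recursion: the output of the whole job starting at indent `ind`
def pvOut : List String → Int → List String
  | [], _ => []
  | l :: rest, ind => pvRender (ind - pvCloses l) l :: pvOut rest (ind - pvCloses l + pvOpens l)

-- A's loop body, named (definitionally equal to the lambda in the port of A)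
def pvStep (st : List String × Int) (l : String) : List String × Int :=
  (st.1 ++ [String.ofList (PySem.List.pyRepeat [' ']
      (4 * (if PySem.Str.isIn "}" l || PySem.Str.isIn ">>" l then st.2 - 1 else st.2)) ++ l.toList)],
   if PySem.Str.isIn "{" (String.ofList (PySem.List.pyRepeat [' ']
        (4 * (if PySem.Str.isIn "}" l || PySem.Str.isIn ">>" l then st.2 - 1 else st.2)) ++ l.toList))
      || PySem.Str.isIn "<<" (String.ofList (PySem.List.pyRepeat [' ']
        (4 * (if PySem.Str.isIn "}" l || PySem.Str.isIn ">>" l then st.2 - 1 else st.2)) ++ l.toList))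
   then (if PySem.Str.isIn "}" l || PySem.Str.isIn ">>" l then st.2 - 1 else st.2) + 1
   else (if PySem.Str.isIn "}" l || PySem.Str.isIn ">>" l then st.2 - 1 else st.2))

-- a space prefix does not create or destroy an occurrence of a space-free pattern
theorem pv_infix_replicate_space (sub l : List Char) (k : ℕ)
    (hne : sub ≠ []) (hs : ' ' ∉ sub) :
    (sub <:+: (List.replicate k ' ' ++ l)) ↔ sub <:+: l := by
  induction k with
  | zero => simp
  | succ k ih =>
    rw [List.replicate_succ, List.cons_append, List.infix_cons_iff]
    constructor
    · rintro (hp | h)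
      · cases sub with
        | nil => exact absurd rfl hne
        | cons a s =>
          rw [List.cons_prefix_cons] at hp
          exact absurd hp.1.symm (fun h => hs (h ▸ List.mem_cons_self))
      · exact ih.mp h
    · intro h; exact Or.inr (ih.mpr h)

theorem pv_isIn_render (sub l : String) (m : Int)
    (hne : sub.toList ≠ []) (hs : ' ' ∉ sub.toList) :
    PySem.Str.isIn sub (String.ofList (PySem.List.pyRepeat [' '] m ++ l.toList))
      = PySem.Str.isIn sub l := by
  have hiff := pv_infix_replicate_space sub.toList l.toList m.toNat hne hs
  rcases Bool.eq_false_or_eq_true (PySem.Str.isIn sub l) with h | h <;> rw [h]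
  · rw [PySem.Str.isIn_iff_infix, String.toList_ofList, PySem.List.pyRepeat_singleton, hiff]
    exact (PySem.Str.isIn_iff_infix sub l).mp h
  · rw [Bool.eq_false_iff, Ne, PySem.Str.isIn_iff_infix, String.toList_ofList,
      PySem.List.pyRepeat_singleton, hiff]
    rw [Bool.eq_false_iff, Ne, PySem.Str.isIn_iff_infix] at h
    exact h

theorem pvStep_eq (acc : List String) (ind : Int) (l : String) :
    pvStep (acc, ind) l = (acc ++ [pvRender (ind - pvCloses l) l], ind - pvCloses l + pvOpens l) := by
  unfold pvStep pvRender pvCloses pvOpens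
  rw [pv_isIn_render "{" l _ (by decide) (by decide),
    pv_isIn_render "<<" l _ (by decide) (by decide)]
  split_ifs <;> simp

theorem pvA_loop (lines : List String) (acc : List String) (ind : Int) :
    (lines.foldl pvStep (acc, ind)).1 = acc ++ pvOut lines ind := by
  induction lines generalizing acc ind with
  | nil => simp [pvOut]
  | cons l rest ih =>
    rw [List.foldl_cons, pvStep_eq, ih]
    simp [pvOut]

-- B's per-line closed form over the prefix equals the reference recursion
theorem pvB_main (rest pre : List String) :
    (PySem.List.enumerate rest (pre.length : Int)).map (fun p =>
      String.ofList (PySem.List.pyRepeat [' ']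
        (4 * (((PySem.List.slice (pre ++ rest) none (some p.1)).map pvOpens).sum
              - ((PySem.List.slice (pre ++ rest) none (some (p.1 + 1))).map pvCloses).sum)) ++ p.2.toList))
      = pvOut rest ((pre.map pvOpens).sum - (pre.map pvCloses).sum) := by
  induction rest generalizing pre with
  | nil => simp [pvOut, PySem.List.enumerate]
  | cons l rest ih =>
    rw [PySem.List.enumerate_cons, List.map_cons, pvOut]
    congr 1
    · -- head: slices of length pre.length and pre.length+1
      have h1 : PySem.List.slice (pre ++ l :: rest) none (some (pre.length : Int)) = pre := by
        rw [PySem.List.slice_to_natCast]; simp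
      have h2 : PySem.List.slice (pre ++ l :: rest) none (some ((pre.length : Int) + 1)) = pre ++ [l] := by
        have : ((pre.length : Int) + 1) = ((pre.length + 1 : ℕ) : Int) := by push_cast; ring
        rw [this, PySem.List.slice_to_natCast]
        rw [List.take_append, List.take_of_length_le (by omega), Nat.add_sub_cancel_left]
        rfl
      rw [h1, h2, pvRender]
      simp only [List.map_append, List.sum_append, List.map_cons, List.map_nil, List.sum_cons,
        List.sum_nil]
      ring_nf
    · -- tail: instantiate ih with pre ++ [l]
      have := ih (pre ++ [l])
      simp only [List.length_append, List.length_cons, List.length_nil, List.append_assoc,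
        List.cons_append, List.nil_append, List.map_append, List.sum_append, List.map_cons,
        List.map_nil, List.sum_cons, List.sum_nil, Nat.cast_add, Nat.cast_one, zero_add] at this
      rw [this]
      congr 1
      ring

-- ===== VERDICT (by name: the statement is the Claim_ definition above) =====
theorem add_indentation_spec : Claim_equal_add_indentation := by
  intro old_lines _
  unfold Spec_add_indentation
  show add_indentation old_lines = add_indentation_alt old_lines
  have hA : add_indentation old_lines =
      ((old_lines.flatMap (fun s => (PySem.Str.split? s "\n").getD [])).foldl pvStep ([], 0)).1 := rfl
  have hB := pvB_main (old_lines.flatMap (fun s => (PySem.Str.split? s "\n").getD [])) []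
  simp only [List.length_nil, Nat.cast_zero, List.nil_append, List.map_nil, List.sum_nil,
    sub_zero] at hB
  rw [hA, pvA_loop, List.nil_append]
  exact hB.symm
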